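-- pv_equiv track=rewrite | github.com/dudamarlena/pyc_source | pycfiles/YouSet-2.0.tar/complexbuilder.cpython-37.py | UsedIdentifiers
-- ===== SOURCE A (Python) =====
-- def UsedIdentifiers(equivalences):
--     """Reads all the identifiers that have already been used by the user or have been newly added to the complex.
--
--         Arguments:
--                 equivalences -- dictionary with chain IDs as keys and the equivalent IDs as values
--
--         Returns:
--                 List with the identifiers
--         """
--     str_chains = []
--     int_chains = []
--     for element in equivalences:
--         for x in equivalences[element]:
--             if x in ('1', '2', '3', '4', '5', '6', '7', '8', '9'):
--                 int_chains.append(x)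
--             else:
--                 str_chains.append(x)
--
--     str_chains = sorted(str_chains)
--     int_chains = sorted(int_chains)
--     for element in int_chains:
--         str_chains.append(element)
--
--     return str_chains
-- ===== SOURCE B (Python) =====
-- def UsedIdentifiers(equivalences):
--     """Flatten all equivalent IDs and sort once with a composite
--     (is-digit-1-9, value) key: non-digit IDs first (sorted), then digit IDs (sorted)."""
--     digits = ('1', '2', '3', '4', '5', '6', '7', '8', '9')
--     chars = []
--     for chain in equivalences.values():
--         chars.extend(chain)
--     return sorted(chars, key=lambda x: (x in digits, x))
-- ===== Notes on version B (the rewrite author's own statement) =====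
-- stated objective: idiomatic
-- what changed: Replaces the two-accumulator partition loop, two separate sorts and the final append loop by one flattening pass plus a single sort with a composite (is-digit-1-9, value) key.
import Mathlib
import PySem

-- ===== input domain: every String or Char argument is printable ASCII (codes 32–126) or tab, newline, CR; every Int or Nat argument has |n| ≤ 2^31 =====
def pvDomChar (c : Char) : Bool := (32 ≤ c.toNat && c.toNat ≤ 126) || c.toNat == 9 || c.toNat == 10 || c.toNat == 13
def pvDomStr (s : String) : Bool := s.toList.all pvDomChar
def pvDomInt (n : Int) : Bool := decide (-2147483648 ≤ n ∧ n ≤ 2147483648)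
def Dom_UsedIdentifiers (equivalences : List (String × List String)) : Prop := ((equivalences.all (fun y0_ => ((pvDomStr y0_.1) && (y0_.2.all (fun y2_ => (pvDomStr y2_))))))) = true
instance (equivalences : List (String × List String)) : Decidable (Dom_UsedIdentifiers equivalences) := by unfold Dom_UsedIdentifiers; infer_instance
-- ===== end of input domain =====

-- B replaces A's partition loop + two sorts + append loop by one flatten pass and a single
-- sort with a composite (is-digit-1-9, value) key; same cost, more idiomatic.

-- the tuple ('1', …, '9') of both programs, and membership in it
def pvDigits : List String := ["1", "2", "3", "4", "5", "6", "7", "8", "9"]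
def pvIsDig (x : String) : Bool := pvDigits.contains x

-- ===== PORT A =====
def UsedIdentifiers (equivalences : List (String × List String)) : List String :=
  let d := PySem.Dict.ofList equivalences
  -- str_chains = []; int_chains = []; for element in equivalences: for x in equivalences[element]: …
  let p := d.keys.foldl (fun (p : List String × List String) element =>
      (d.getD element []).foldl (fun p x =>
        if pvIsDig x then (p.1, p.2 ++ [x]) else (p.1 ++ [x], p.2)) p) ([], [])
  let str_chains := PySem.List.sorted p.1 (fun x => x) false
  let int_chains := PySem.List.sorted p.2 (fun x => x) false
  -- for element in int_chains: str_chains.append(element)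
  int_chains.foldl (fun acc element => acc ++ [element]) str_chains

-- ===== PORT B =====
def UsedIdentifiers_alt (equivalences : List (String × List String)) : List String :=
  let d := PySem.Dict.ofList equivalences
  -- chars = []; for chain in equivalences.values(): chars.extend(chain)
  let chars := d.values.foldl (fun acc chain => acc ++ chain) []
  -- sorted(chars, key=lambda x: (x in digits, x))
  PySem.List.sorted2 chars (fun x => pvIsDig x) (fun x => x) false

-- ===== PRECONDITION & SPEC =====
def Spec_UsedIdentifiers (equivalences : List (String × List String)) (out : List String) : Prop := out = UsedIdentifiers_alt equivalences
instance (equivalences : List (String × List String)) (out : List String) : Decidable (Spec_UsedIdentifiers equivalences out) := by unfold Spec_UsedIdentifiers; infer_instance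

-- ===== CLAIM (what is proved, stated in full; the proofs are below) =====
def Claim_equal_UsedIdentifiers : Prop := ∀ (equivalences : List (String × List String)), Dom_UsedIdentifiers equivalences → Spec_UsedIdentifiers equivalences (UsedIdentifiers equivalences)

-- ===== LEMMAS AND PROOFS =====

-- insertBy passes over a prefix it never stops in
theorem pv_insertBy_append_of_false {α : Type} (b : α → α → Bool) (x : α) (L1 L2 : List α)
    (h : ∀ y ∈ L1, b x y = false) :
    PySem.List.insertBy b x (L1 ++ L2) = L1 ++ PySem.List.insertBy b x L2 := by
  induction L1 with
  | nil => rfl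
  | cons y ys ih =>
    simp only [List.cons_append, PySem.List.insertBy, h y (by simp)]
    simp [ih (fun z hz => h z (by simp [hz]))]

-- insertBy stops before a suffix it always stops at
theorem pv_insertBy_append_of_true {α : Type} (b : α → α → Bool) (x : α) (L1 L2 : List α)
    (h : ∀ y ∈ L2, b x y = true) :
    PySem.List.insertBy b x (L1 ++ L2) = PySem.List.insertBy b x L1 ++ L2 := by
  induction L1 with
  | nil =>
    cases L2 with
    | nil => rfl
    | cons y ys => simp [PySem.List.insertBy, h y (by simp)]
  | cons y ys ih =>
    simp only [List.cons_append, PySem.List.insertBy]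
    by_cases hb : b x y = true
    · simp [hb]
    · simp only [Bool.not_eq_true] at hb; simp [hb, ih]

theorem pv_insertBy_congr {α : Type} (b b' : α → α → Bool) (x : α) (L : List α)
    (h : ∀ y ∈ L, b x y = b' x y) :
    PySem.List.insertBy b x L = PySem.List.insertBy b' x L := by
  induction L with
  | nil => rfl
  | cons y ys ih =>
    simp only [PySem.List.insertBy, h y (by simp)]
    rw [ih (fun z hz => h z (by simp [hz]))]

-- the composite-key sort is the non-digit sort followed by the digit sort
theorem pv_sorted2_split (xs : List String) :
    PySem.List.sorted2 xs (fun x => pvIsDig x) (fun x => x) false =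
      PySem.List.sorted (xs.filter (fun x => !pvIsDig x)) (fun x => x) false ++
      PySem.List.sorted (xs.filter (fun x => pvIsDig x)) (fun x => x) false := by
  induction xs using List.reverseRecOn with
  | nil => rfl
  | append_singleton xs x ih =>
    have hstep : PySem.List.sorted2 (xs ++ [x]) (fun x => pvIsDig x) (fun x => x) false =
        PySem.List.insertBy
          (fun a b => decide (pvIsDig a < pvIsDig b) || !decide (pvIsDig b < pvIsDig a) && decide (a < b))
          x (PySem.List.sorted2 xs (fun x => pvIsDig x) (fun x => x) false) := by
      simp [PySem.List.sorted2, List.foldl_append]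
    have hsort : ∀ (l : List String),
        PySem.List.sorted (l ++ [x]) (fun x => x) false =
          PySem.List.insertBy (fun a b => decide (a < b)) x
            (PySem.List.sorted l (fun x => x) false) := by
      intro l; simp [PySem.List.sorted, List.foldl_append]
    rw [hstep, ih]
    by_cases hx : pvIsDig x = true
    · rw [pv_insertBy_append_of_false _ _ _ _ (by
        intro y hy
        have hy' : pvIsDig y = false := by
          have := (PySem.List.mem_sorted _ _ _ _).mp hy
          simpa using (List.of_mem_filter this)
        simp [hx, hy'])]
      rw [pv_insertBy_congr _ (fun a b => decide (a < b)) x _ (by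
        intro y hy
        have hy' : pvIsDig y = true := by
          have := (PySem.List.mem_sorted _ _ _ _).mp hy
          simpa using (List.of_mem_filter this)
        simp [hx, hy'])]
      simp [List.filter_append, hx, hsort]
    · simp only [Bool.not_eq_true] at hx
      rw [pv_insertBy_append_of_true _ _ _ _ (by
        intro y hy
        have hy' : pvIsDig y = true := by
          have := (PySem.List.mem_sorted _ _ _ _).mp hy
          simpa using (List.of_mem_filter this)
        simp [hx, hy'])]
      rw [pv_insertBy_congr _ (fun a b => decide (a < b)) x _ (by
        intro y hy
        have hy' : pvIsDig y = false := by
          have := (PySem.List.mem_sorted _ _ _ _).mp hy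
          simpa using (List.of_mem_filter this)
        simp [hx, hy'])]
      simp [List.filter_append, hx, hsort]

-- A's inner loop partitions a chain onto the two accumulators
theorem pv_inner_loop (l : List String) (p : List String × List String) :
    l.foldl (fun p x => if pvIsDig x then (p.1, p.2 ++ [x]) else (p.1 ++ [x], p.2)) p =
      (p.1 ++ l.filter (fun x => !pvIsDig x), p.2 ++ l.filter (fun x => pvIsDig x)) := by
  induction l generalizing p with
  | nil => simp
  | cons x l ih =>
    by_cases hx : pvIsDig x = true <;> simp [List.foldl_cons, hx, ih]

-- A's outer loop partitions the flattened chains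
theorem pv_outer_loop (vs : List (List String)) (p : List String × List String) :
    vs.foldl (fun p c =>
        c.foldl (fun p x => if pvIsDig x then (p.1, p.2 ++ [x]) else (p.1 ++ [x], p.2)) p) p =
      (p.1 ++ vs.flatten.filter (fun x => !pvIsDig x), p.2 ++ vs.flatten.filter (fun x => pvIsDig x)) := by
  induction vs generalizing p with
  | nil => simp
  | cons c vs ih =>
    rw [List.foldl_cons, pv_inner_loop, ih]
    simp [List.filter_append]

-- B's extend loop flattens
theorem pv_foldl_append_flatten (vs : List (List String)) (acc : List String) :
    vs.foldl (fun acc chain => acc ++ chain) acc = acc ++ vs.flatten := by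
  induction vs generalizing acc with
  | nil => simp
  | cons c vs ih => simp [List.foldl_cons, ih]

-- ===== VERDICT (by name: the statement is the Claim_ definition above) =====
theorem UsedIdentifiers_spec : Claim_equal_UsedIdentifiers := by
  intro equivalences _
  show UsedIdentifiers equivalences = UsedIdentifiers_alt equivalences
  unfold UsedIdentifiers UsedIdentifiers_alt
  set d := PySem.Dict.ofList equivalences with hd
  have hvals : d.keys.map (fun k => d.getD k []) = d.values :=
    (PySem.Dict.values_eq_map_keys d (PySem.Dict.nodup_keys_ofList equivalences) []).symm
  have hkeys : d.keys.foldl (fun (p : List String × List String) element =>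
      (d.getD element []).foldl (fun p x =>
        if pvIsDig x then (p.1, p.2 ++ [x]) else (p.1 ++ [x], p.2)) p) ([], []) =
      d.values.foldl (fun p c =>
        c.foldl (fun p x => if pvIsDig x then (p.1, p.2 ++ [x]) else (p.1 ++ [x], p.2)) p) ([], []) := by
    rw [← hvals, List.foldl_map]
  simp only [hkeys, pv_outer_loop, List.nil_append, pv_foldl_append_flatten, pv_sorted2_split,
    PySem.List.foldl_append_singleton]
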